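-- pv_equiv track=rewrite | github.com/yungvldai/python-matrix-pro | matrix.py | matrank
-- ===== SOURCE A (Python) =====
-- def td_array(m, n):  # функция для создания пустого двумерного массива
--     temp = []
--     for i in range(0, m):
--         temp.append([])
--         for j in range(0, n):
--             temp[i].append(0)
--     return temp
--
-- def getmm(m, i, j):
--     return [row[:j] + row[j + 1:] for row in (m[:i] + m[i + 1:])]
--
-- def getdet(m):
--     if len(m) == 2:
--         return m[0][0] * m[1][1] - m[0][1] * m[1][0]
--
--     determinant = 0
--     for c in range(len(m)):
--         determinant += ((-1) ** c) * m[0][c] * getdet(getmm(m, 0, c))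
--     return determinant
--
-- def matrank(a):
--     r = 1
--     q = 1
--     i = len(a)
--     j = len(a[0])
--     while q <= min(i, j):
--         t = td_array(q, q)
--         for k in range(0, i - q + 1):
--             for l in range(0, j - q + 1):
--                 for m in range(0, q):
--                     for n in range(0, q):
--                         t[m][n] = a[k + m][l + n]
--                 if getdet(t) != 0:
--                     r = q
--         q += 1
--     return r
-- ===== SOURCE B (Python) =====
-- # max block size with nonzero determinant, dets by subset-DP (O(2^q q) per block vs q! cofactor),
-- # searched from the largest block size down with early exit.
--
-- def _block_det(a, k, l, q):
--     # determinant of the q x q block with top-left corner (k, l), by dynamic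
--     # programming over column subsets (bitmask), expanding along the top row.
--     d = [0] * (1 << q)
--     d[0] = 1
--     for mask in range(1, 1 << q):
--         cols = [c for c in range(q) if (mask >> c) & 1]
--         row = a[k + q - len(cols)]
--         acc = 0
--         sign = 1
--         for c in cols:
--             acc += sign * row[l + c] * d[mask ^ (1 << c)]
--             sign = -sign
--         d[mask] = acc
--     return d[(1 << q) - 1]
--
-- def matrank(a):
--     i = len(a)
--     j = len(a[0])
--     for q in range(min(i, j), 1, -1):
--         for k in range(i - q + 1):
--             for l in range(j - q + 1):
--                 if _block_det(a, k, l, q) != 0: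
--                     return q
--     return 1
-- ===== Notes on version B (the rewrite author's own statement) =====
-- stated objective: faster
-- what changed: A tests every contiguous q×q block for all q ascending, computing each determinant by naive cofactor recursion (O(q!)); B searches block sizes descending with early exit and computes each block determinant by dynamic programming over column subsets (O(2^q q)), never touching the q=1 round that A's buggy 1×1 determinant (always 0) makes a no-op.
import Mathlib
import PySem

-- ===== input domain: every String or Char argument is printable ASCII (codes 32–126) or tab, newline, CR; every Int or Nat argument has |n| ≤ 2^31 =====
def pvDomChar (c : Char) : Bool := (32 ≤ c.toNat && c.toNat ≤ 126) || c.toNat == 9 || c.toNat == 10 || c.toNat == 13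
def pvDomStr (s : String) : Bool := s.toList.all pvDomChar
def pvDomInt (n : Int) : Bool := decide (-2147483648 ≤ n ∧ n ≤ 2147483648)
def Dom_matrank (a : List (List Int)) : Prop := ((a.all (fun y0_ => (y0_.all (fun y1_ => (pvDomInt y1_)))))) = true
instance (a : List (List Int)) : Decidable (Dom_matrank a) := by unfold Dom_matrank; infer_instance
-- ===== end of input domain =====

-- B replaces A's contiguous-block determinant search (naive cofactor recursion, ascending block
-- size) by a subset-DP determinant per block and a descending early-exit search; same value.

-- ===== PORT A =====
def td_array (m n : Int) : List (List Int) :=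
  (PySem.List.pyRange 0 m 1).foldl
    (fun temp i =>
      let temp := temp ++ [[]]
      (PySem.List.pyRange 0 n 1).foldl
        (fun temp _j =>
          PySem.List.pySetD temp i (PySem.List.pyGetD temp i [] ++ [(0 : Int)]))
        temp)
    []

def getmm (m : List (List Int)) (i j : Int) : List (List Int) :=
  (PySem.List.slice m none (some i) ++ PySem.List.slice m (some (i + 1)) none).map
    (fun row => PySem.List.slice row none (some j) ++ PySem.List.slice row (some (j + 1)) none)

-- length fact the recursion in `getdet` needs for termination
theorem pv_length_getmm_zero (m : List (List Int)) (c : Int) :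
    (getmm m 0 c).length = m.length - 1 := by
  unfold getmm
  rw [List.length_map, List.length_append,
      PySem.List.slice_to m (by omega : (0:Int) ≤ 0),
      PySem.List.slice_from m (by omega : (0:Int) ≤ 0 + 1)]
  simp

def getdet (m : List (List Int)) : Int :=
  if PySem.List.len m = 2 then
    PySem.List.pyGetD (PySem.List.pyGetD m 0 []) 0 0 * PySem.List.pyGetD (PySem.List.pyGetD m 1 []) 1 0
      - PySem.List.pyGetD (PySem.List.pyGetD m 0 []) 1 0 * PySem.List.pyGetD (PySem.List.pyGetD m 1 []) 0 0
  else
    (List.range m.length).attach.foldl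
      (fun det c =>
        det + (-1) ^ c.1 * PySem.List.pyGetD (PySem.List.pyGetD m 0 []) (c.1 : Int) 0
            * getdet (getmm m 0 (c.1 : Int)))
      0
termination_by m.length
decreasing_by
  have h1 := List.mem_range.mp c.2
  rw [pv_length_getmm_zero]; omega

def matrank (a : List (List Int)) : Int :=
  let i := PySem.List.len a
  let j := PySem.List.len (PySem.List.pyGetD a 0 [])
  ((PySem.List.pyRange 1 (min i j + 1) 1).foldl
    (fun (st : Int × List (List Int)) q =>
      (PySem.List.pyRange 0 (i - q + 1) 1).foldl
        (fun st k =>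
          (PySem.List.pyRange 0 (j - q + 1) 1).foldl
            (fun st l =>
              let t :=
                (PySem.List.pyRange 0 q 1).foldl
                  (fun t m =>
                    (PySem.List.pyRange 0 q 1).foldl
                      (fun t n =>
                        PySem.List.pySetD t m
                          (PySem.List.pySetD (PySem.List.pyGetD t m []) n
                            (PySem.List.pyGetD (PySem.List.pyGetD a (k + m) []) (l + n) 0)))
                      t)
                  st.2
              (if getdet t ≠ 0 then q else st.1, t))
            st)
        (st.1, td_array q q))
    ((1 : Int), ([] : List (List Int)))).1

-- ===== PORT B =====
-- Python's masks here are the nonnegative ints 0 .. 2^q - 1, represented as Nat so that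
-- Python's <<, >>, &, ^ are Nat's <<<, >>>, &&&, ^^^ (exact on nonnegative values).
def blockDet (a : List (List Int)) (k l q : Int) : Int :=
  let qn := q.toNat
  let d : List Int := (List.replicate (2 ^ qn) (0 : Int)).set 0 1
  let d :=
    (List.range' 1 (2 ^ qn - 1)).foldl
      (fun d mask =>
        let cols := (List.range qn).filter (fun c => (mask >>> c) &&& 1 == 1)
        let row := PySem.List.pyGetD a (k + q - (cols.length : Int)) []
        let acc :=
          (cols.foldl
            (fun (p : Int × Int) (c : Nat) =>
              (p.1 + p.2 * PySem.List.pyGetD row (l + (c : Int)) 0 * d.getD (mask ^^^ ((1:Nat) <<< c)) 0,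
               -p.2))
            (0, 1)).1
        d.set mask acc)
      d
  d.getD (2 ^ qn - 1) 0

def searchQ (a : List (List Int)) (i j : Int) : List Int → Int
  | [] => 1
  | q :: rest =>
    if (PySem.List.pyRange 0 (i - q + 1) 1).any (fun k =>
          (PySem.List.pyRange 0 (j - q + 1) 1).any (fun l => blockDet a k l q != 0)) then q
    else searchQ a i j rest

def matrank_alt (a : List (List Int)) : Int :=
  let i := PySem.List.len a
  let j := PySem.List.len (PySem.List.pyGetD a 0 [])
  searchQ a i j (PySem.List.pyRange (min i j) 1 (-1))

-- ===== PRECONDITION & SPEC =====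
-- Pre_ excludes exactly the inputs where the Python A raises IndexError: the empty list
-- (a[0]) and matrices with some row shorter than the first row (a[k+m][l+n]).
def Pre_matrank (a : List (List Int)) : Prop :=
  a ≠ [] ∧ ∀ row ∈ a, (a.headD []).length ≤ row.length
instance (a : List (List Int)) : Decidable (Pre_matrank a) := by unfold Pre_matrank; infer_instance
def pvWitness_matrank : List (List Int) := [[1, 2], [3, 4]]

def Spec_matrank (a : List (List Int)) (out : Int) : Prop := out = matrank_alt a
instance (a : List (List Int)) (out : Int) : Decidable (Spec_matrank a out) := by unfold Spec_matrank; infer_instance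

-- ===== CLAIM (what is proved, stated in full; the proofs are below) =====
def Claim_equal_matrank : Prop := ∀ (a : List (List Int)), Dom_matrank a → Pre_matrank a → Spec_matrank a (matrank a)

-- ===== LEMMAS AND PROOFS =====

-- the entry a[r][c] both ports read (0-default outside, never reached on square data)
def eAt (a : List (List Int)) (r c : Int) : Int :=
  PySem.List.pyGetD (PySem.List.pyGetD a r []) c 0

-- alternating-sign sum g c₀ - g c₁ + g c₂ - …
def altSum (g : Nat → Int) : List Nat → Int
  | [] => 0
  | c :: cs => g c - altSum g cs

-- the minor of `a` on rows k+q-s .. k+q-1 and columns l+c for c ∈ cols (s = cols.length)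
def subM (a : List (List Int)) (k l : Int) (q : Nat) (cols : List Nat) : List (List Int) :=
  (List.range cols.length).map
    (fun r => cols.map (fun (c : Nat) => eAt a (k + ((q - cols.length + r : Nat) : Int)) (l + (c : Int))))

-- cofactor expansion of det (subM a k l q cols) along its first row, down to the empty minor
def Dcols (a : List (List Int)) (k l : Int) (q : Nat) (cols : List Nat) : Int :=
  if cols.isEmpty then 1
  else
    (List.range cols.length).attach.foldl
      (fun det idx =>
        det + (-1) ^ idx.1 * eAt a (k + ((q - cols.length : Nat) : Int)) (l + (cols.getD idx.1 0 : Int))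
            * Dcols a k l q (cols.eraseIdx idx.1))
      0
termination_by cols.length
decreasing_by
  have h1 := List.mem_range.mp idx.2
  rw [List.length_eraseIdx, if_pos h1]; omega

def colsOf (mask q : Nat) : List Nat :=
  (List.range q).filter (fun c => (mask >>> c) &&& 1 == 1)

def pvShape (qn : Nat) (t : List (List Int)) : Prop :=
  t.length = qn ∧ ∀ r ∈ t, r.length = qn


-- fold with a pair state whose first component evolves independently of the second
theorem pvFoldl_fst {M : Type} (l : List Int) (F : (Int × M) → Int → (Int × M)) (G : Int → Int → Int)
    (h : ∀ st x, x ∈ l → (F st x).1 = G st.1 x) : ∀ (st : Int × M), (l.foldl F st).1 = l.foldl G st.1 := by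
  induction l with
  | nil => intro st; rfl
  | cons x xs ih =>
    intro st
    simp only [List.foldl_cons]
    rw [ih (fun st y hy => h st y (by simp [hy])) (F st x), h st x (by simp)]

theorem pvAltSum_congr (f g : Nat → Int) : ∀ (cols : List Nat), (∀ c ∈ cols, f c = g c) →
    altSum f cols = altSum g cols := by
  intro cols
  induction cols with
  | nil => intro _; rfl
  | cons c cs ih =>
    intro h
    simp only [altSum]
    rw [h c (by simp), ih (fun x hx => h x (by simp [hx]))]

theorem pvSum_map_neg (l : List Nat) (f : Nat → Int) :
    (l.map (fun x => -(f x))).sum = -((l.map f).sum) := by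
  induction l with
  | nil => simp
  | cons x xs ih => simp [ih]; ring

theorem pvAltSum_eq_sum (g : Nat → Int) : ∀ (cols : List Nat),
    altSum g cols = ((List.range cols.length).map (fun idx => (-1:Int)^idx * g (cols.getD idx 0))).sum := by
  intro cols
  induction cols with
  | nil => simp [altSum]
  | cons c cs ih =>
    rw [show altSum g (c :: cs) = g c - altSum g cs from rfl, ih]
    rw [List.length_cons, List.range_succ_eq_map, List.map_cons, List.map_map, List.sum_cons]
    have hfun : ((fun idx => (-1:Int)^idx * g ((c :: cs).getD idx 0)) ∘ Nat.succ)
        = (fun x : Nat => -((-1:Int)^x * g (cs.getD x 0))) := by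
      funext x
      simp [Function.comp, pow_succ]
    rw [hfun, pvSum_map_neg]
    simp only [List.getD_cons_zero, pow_zero, one_mul]
    ring

theorem pvSignFold (gA gB : Nat → Int) : ∀ (cols : List Nat) (A sg : Int),
    (cols.foldl (fun (p : Int × Int) (c : Nat) => (p.1 + p.2 * gA c * gB c, -p.2)) (A, sg)).1
      = A + sg * altSum (fun c => gA c * gB c) cols := by
  intro cols
  induction cols with
  | nil => intro A sg; simp [altSum]
  | cons c cs ih =>
    intro A sg
    simp only [List.foldl_cons]
    rw [ih]
    simp [altSum]
    ring

theorem pvFilter_ne_eraseIdx : ∀ (cols : List Nat), cols.Nodup → ∀ (idx : Nat), idx < cols.length →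
    cols.filter (fun x => decide (x ≠ cols.getD idx 0)) = cols.eraseIdx idx := by
  intro cols
  induction cols with
  | nil => intro _ idx h; simp at h
  | cons c cs ih =>
    intro hnd idx hidx
    have hc : c ∉ cs := (List.nodup_cons.mp hnd).1
    rcases idx with _ | idx
    · simp only [List.getD_cons_zero, List.eraseIdx_cons_zero, List.filter_cons]
      rw [if_neg (by simp)]
      rw [List.filter_eq_self.mpr]
      intro x hx
      simp only [ne_eq, decide_eq_true_eq]
      intro hxc; exact hc (hxc ▸ hx)
    · simp only [List.getD_cons_succ, List.eraseIdx_cons_succ, List.filter_cons]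
      have hlt : idx < cs.length := by simpa using hidx
      have hmem : cs.getD idx 0 ∈ cs := by
        rw [List.getD_eq_getElem cs 0 hlt]; exact List.getElem_mem hlt
      have hcne : c ≠ cs.getD idx 0 := by
        intro h; exact hc (h ▸ hmem)
      rw [if_pos (by simpa using hcne)]
      rw [ih (List.nodup_cons.mp hnd).2 idx hlt]

-- bit-level facts
theorem pvTestBit (mask c : Nat) : ((mask >>> c) &&& 1 == 1) = mask.testBit c := by
  simp [Nat.testBit]

theorem pvColsOf_mem (mask q c : Nat) : c ∈ colsOf mask q ↔ c < q ∧ mask.testBit c := by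
  simp only [colsOf, List.mem_filter, List.mem_range, pvTestBit]

theorem pvColsOf_nodup (mask q : Nat) : (colsOf mask q).Nodup :=
  (List.nodup_range).filter _

theorem pvColsOf_len (mask q : Nat) : (colsOf mask q).length ≤ q :=
  le_trans (List.length_filter_le _ _) (by simp)

theorem pvColsOf_xor (mask q c : Nat) (hb : mask.testBit c = true) :
    colsOf (mask ^^^ ((1:Nat) <<< c)) q = (colsOf mask q).filter (fun x => decide (x ≠ c)) := by
  unfold colsOf
  rw [List.filter_filter]
  apply List.filter_congr
  intro x _
  rw [pvTestBit, pvTestBit]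
  rw [Nat.testBit_xor, Nat.one_shiftLeft, Nat.testBit_two_pow]
  by_cases hx : x = c
  · subst hx; simp [hb]
  · simp [hx, Ne.symm hx]

theorem pvXor_lt (mask c : Nat) (hb : mask.testBit c = true) :
    mask ^^^ ((1:Nat) <<< c) < mask := by
  apply Nat.lt_of_testBit c
  · simp [Nat.testBit_xor, Nat.one_shiftLeft, hb]
  · exact hb
  · intro j hj
    have hcj : decide (c = j) = false := decide_eq_false (by omega)
    simp [Nat.testBit_xor, Nat.one_shiftLeft, Nat.testBit_two_pow, hcj]

theorem pvColsOf_ne_nil (mask q : Nat) (h0 : mask ≠ 0) (hlt : mask < 2^q) :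
    colsOf mask q ≠ [] := by
  intro h
  apply h0
  apply Nat.eq_of_testBit_eq
  intro i
  rw [Nat.zero_testBit]
  by_cases hi : i < q
  · by_contra hbit
    have : i ∈ colsOf mask q := (pvColsOf_mem mask q i).mpr ⟨hi, by simpa using hbit⟩
    rw [h] at this; simp at this
  · exact Nat.testBit_lt_two_pow (lt_of_lt_of_le hlt (Nat.pow_le_pow_right (by omega) (by omega)))

theorem pvColsOf_zero (q : Nat) : colsOf 0 q = [] := by
  unfold colsOf
  apply List.filter_eq_nil_iff.mpr
  intro x _
  rw [pvTestBit, Nat.zero_testBit]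
  simp

theorem pvColsOf_full (q : Nat) : colsOf (2^q - 1) q = List.range q := by
  unfold colsOf
  apply List.filter_eq_self.mpr
  intro x hx
  rw [pvTestBit, Nat.testBit_two_pow_sub_one]
  simpa using List.mem_range.mp hx

-- Dcols basics
theorem pvDcols_nil (a : List (List Int)) (k l : Int) (q : Nat) : Dcols a k l q [] = 1 := by
  rw [Dcols.eq_def]; rfl

theorem pvDcols_eq_sum (a : List (List Int)) (k l : Int) (q : Nat) (cols : List Nat) (h : cols ≠ []) :
    Dcols a k l q cols =
      ((List.range cols.length).map
        (fun idx => (-1:Int)^idx * eAt a (k + ((q - cols.length : Nat) : Int)) (l + (cols.getD idx 0 : Int))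
            * Dcols a k l q (cols.eraseIdx idx))).sum := by
  conv_lhs => rw [Dcols.eq_def]
  rw [if_neg (by simpa [List.isEmpty_iff] using h)]
  have hfa := List.foldl_attach (l := List.range cols.length)
    (f := fun det idx => det + (-1:Int)^idx * eAt a (k + ((q - cols.length : Nat) : Int)) (l + (cols.getD idx 0 : Int))
            * Dcols a k l q (cols.eraseIdx idx)) (b := 0)
  rw [hfa, PySem.List.foldl_add]
  simp

theorem pvDcols_single (a : List (List Int)) (k l : Int) (q : Nat) (c : Nat) :
    Dcols a k l q [c] = eAt a (k + ((q - 1 : Nat) : Int)) (l + (c : Int)) := by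
  rw [pvDcols_eq_sum a k l q [c] (by simp)]
  simp [List.range_succ, pvDcols_nil]

theorem pvDcols_altSum (a : List (List Int)) (k l : Int) (q : Nat) (cols : List Nat)
    (hnd : cols.Nodup) (h : cols ≠ []) :
    Dcols a k l q cols =
      altSum (fun c => eAt a (k + ((q - cols.length : Nat) : Int)) (l + (c : Int))
          * Dcols a k l q (cols.filter (fun x => decide (x ≠ c)))) cols := by
  rw [pvDcols_eq_sum a k l q cols h, pvAltSum_eq_sum]
  congr 1
  apply List.map_congr_left
  intro idx hidx
  rw [pvFilter_ne_eraseIdx cols hnd idx (List.mem_range.mp hidx)]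
  ring

-- subM basics
theorem pvSubM_length (a : List (List Int)) (k l : Int) (q : Nat) (cols : List Nat) :
    (subM a k l q cols).length = cols.length := by
  simp [subM]

theorem pvShape_subM (a : List (List Int)) (k l : Int) (qn : Nat) :
    pvShape qn (subM a k l qn (List.range qn)) := by
  constructor
  · simp [subM]
  · intro r hr
    simp only [subM, List.mem_map] at hr
    obtain ⟨x, _, rfl⟩ := hr
    simp

theorem pvGetmm_subM (a : List (List Int)) (k l : Int) (q : Nat) (cols : List Nat) (idx : Nat)
    (hidx : idx < cols.length) (hq : cols.length ≤ q) :
    getmm (subM a k l q cols) 0 (idx : Int) = subM a k l q (cols.eraseIdx idx) := by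
  obtain ⟨s', hs'⟩ : ∃ s', cols.length = s' + 1 := ⟨cols.length - 1, by omega⟩
  unfold getmm subM
  rw [PySem.List.slice_to _ (by omega : (0:Int) ≤ 0),
      PySem.List.slice_from _ (by omega : (0:Int) ≤ 0 + 1)]
  simp only [show ((0:Int)).toNat = 0 from rfl, show ((0:Int) + 1).toNat = 1 from rfl,
    List.take_zero, List.nil_append]
  rw [hs', List.range_succ_eq_map]
  simp only [List.map_cons, List.drop_succ_cons, List.drop_zero, List.map_map]
  rw [List.length_eraseIdx, if_pos hidx, hs', Nat.add_sub_cancel]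
  apply List.map_congr_left
  intro r _
  simp only [Function.comp_apply, Nat.succ_eq_add_one]
  rw [PySem.List.slice_to _ (by omega : (0:Int) ≤ (idx : Int)),
      PySem.List.slice_from _ (by omega : (0:Int) ≤ (idx : Int) + 1)]
  rw [show ((idx : Int)).toNat = idx from by omega, show ((idx : Int) + 1).toNat = idx + 1 from by omega]
  rw [show q - (s' + 1) + (r + 1) = q - s' + r from by omega]
  rw [List.eraseIdx_eq_take_drop_succ, List.map_append, List.map_take, List.map_drop]

-- getdet in sum form, and getdet = Dcols on minors
theorem pvGetdet_two (r0 r1 : List Int) :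
    getdet [r0, r1] = r0.getD 0 0 * r1.getD 1 0 - r0.getD 1 0 * r1.getD 0 0 := by
  rw [getdet.eq_def]
  rw [if_pos (by simp [PySem.List.len])]
  simp [pysem]

theorem pvGetdet_eq_sum (m : List (List Int)) (h2 : m.length ≠ 2) :
    getdet m = ((List.range m.length).map
      (fun (c : Nat) => (-1:Int)^c * PySem.List.pyGetD (PySem.List.pyGetD m 0 []) (c:Int) 0
          * getdet (getmm m 0 (c:Int)))).sum := by
  conv_lhs => rw [getdet.eq_def]
  rw [if_neg (by simp [PySem.List.len]; omega)]
  have hfa := List.foldl_attach (l := List.range m.length)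
    (f := fun (det : Int) (c : Nat) => det + (-1:Int)^c * PySem.List.pyGetD (PySem.List.pyGetD m 0 []) (c:Int) 0
          * getdet (getmm m 0 (c:Int))) (b := (0:Int))
  rw [hfa, PySem.List.foldl_add]
  simp

theorem pvGetdet_eq_Dcols (a : List (List Int)) (k l : Int) (q : Nat) :
    ∀ (n : Nat) (cols : List Nat), cols.length = n → 2 ≤ n → n ≤ q →
      getdet (subM a k l q cols) = Dcols a k l q cols := by
  intro n
  induction n using Nat.strong_induction_on with
  | _ n ih =>
    intro cols hlen h2 hqn
    by_cases hn2 : n = 2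
    · subst hn2
      rcases cols with _ | ⟨c0, cols⟩; · simp at hlen
      rcases cols with _ | ⟨c1, cols⟩; · simp at hlen
      rcases cols with _ | ⟨c2, cols⟩
      swap
      · simp at hlen
      have hM : subM a k l q [c0, c1] =
          [[eAt a (k + ((q - 2 + 0 : Nat) : Int)) (l + (c0 : Int)), eAt a (k + ((q - 2 + 0 : Nat) : Int)) (l + (c1 : Int))],
           [eAt a (k + ((q - 2 + 1 : Nat) : Int)) (l + (c0 : Int)), eAt a (k + ((q - 2 + 1 : Nat) : Int)) (l + (c1 : Int))]] := by
        unfold subM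
        norm_num [List.range_succ]
      rw [hM, pvGetdet_two]
      rw [pvDcols_eq_sum a k l q [c0, c1] (by simp)]
      norm_num [List.range_succ, pvDcols_single]
      rw [show (((q - 2 : Nat) : Int)) + 1 = (((q - 1 : Nat) : Int)) from by omega]
      ring
    · have h3 : 3 ≤ n := by omega
      have hne : cols ≠ [] := by intro h; rw [h] at hlen; simp at hlen; omega
      rw [pvGetdet_eq_sum _ (by rw [pvSubM_length, hlen]; omega)]
      rw [pvDcols_eq_sum a k l q cols hne]
      rw [pvSubM_length]
      congr 1
      apply List.map_congr_left
      intro idx hidx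
      have hidx' : idx < cols.length := List.mem_range.mp hidx
      have hrow : PySem.List.pyGetD (PySem.List.pyGetD (subM a k l q cols) 0 []) (idx : Int) 0
          = eAt a (k + ((q - cols.length : Nat) : Int)) (l + (cols.getD idx 0 : Int)) := by
        rw [PySem.List.pyGetD_zero]
        unfold subM
        rw [List.getD_eq_getElem?_getD, List.getElem?_map,
            List.getElem?_eq_getElem (by simpa using (by omega : 0 < cols.length))]
        simp only [Option.map_some, Option.getD_some, List.getElem_range, Nat.add_zero]
        rw [PySem.List.pyGetD_natCast]
        rw [List.getD_eq_getElem?_getD, List.getElem?_map, List.getElem?_eq_getElem hidx']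
        simp only [Option.map_some, Option.getD_some]
        rw [List.getD_eq_getElem cols 0 hidx']
      rw [hrow, pvGetmm_subM a k l q cols idx hidx' (by omega)]
      rw [ih (n-1) (by omega) (cols.eraseIdx idx)
            (by rw [List.length_eraseIdx, if_pos hidx']; omega) (by omega) (by omega)]

-- one step of the DP table: processing `mask` extends correctness of the table by one entry
theorem pvDPstep (a : List (List Int)) (k l q : Int) (T : List Int) (mask : Nat)
    (hq : ((q.toNat : Int)) = q)
    (hlen : T.length = 2 ^ q.toNat)
    (hval : ∀ m' : Nat, m' < mask → T.getD m' 0 = Dcols a k l q.toNat (colsOf m' q.toNat))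
    (hm0 : mask ≠ 0) (hmlt : mask < 2 ^ q.toNat) :
    (T.set mask
      ((((List.range q.toNat).filter (fun c => (mask >>> c) &&& 1 == 1)).foldl
        (fun (p : Int × Int) (c : Nat) =>
          (p.1 + p.2 * PySem.List.pyGetD (PySem.List.pyGetD a (k + q - ((((List.range q.toNat).filter (fun c => (mask >>> c) &&& 1 == 1)).length : Nat) : Int)) []) (l + (c : Int)) 0
              * T.getD (mask ^^^ ((1:Nat) <<< c)) 0,
           -p.2))
        (0, 1)).1)).length = 2 ^ q.toNat ∧
    ∀ m : Nat, m ≤ mask →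
      (T.set mask
        ((((List.range q.toNat).filter (fun c => (mask >>> c) &&& 1 == 1)).foldl
          (fun (p : Int × Int) (c : Nat) =>
            (p.1 + p.2 * PySem.List.pyGetD (PySem.List.pyGetD a (k + q - ((((List.range q.toNat).filter (fun c => (mask >>> c) &&& 1 == 1)).length : Nat) : Int)) []) (l + (c : Int)) 0
                * T.getD (mask ^^^ ((1:Nat) <<< c)) 0,
             -p.2))
          (0, 1)).1)).getD m 0 = Dcols a k l q.toNat (colsOf m q.toNat) := by
  have hcols : (List.range q.toNat).filter (fun c => (mask >>> c) &&& 1 == 1) = colsOf mask q.toNat := rfl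
  have hslen : (colsOf mask q.toNat).length ≤ q.toNat := pvColsOf_len _ _
  have hacc :
      (((List.range q.toNat).filter (fun c => (mask >>> c) &&& 1 == 1)).foldl
        (fun (p : Int × Int) (c : Nat) =>
          (p.1 + p.2 * PySem.List.pyGetD (PySem.List.pyGetD a (k + q - ((((List.range q.toNat).filter (fun c => (mask >>> c) &&& 1 == 1)).length : Nat) : Int)) []) (l + (c : Int)) 0
              * T.getD (mask ^^^ ((1:Nat) <<< c)) 0,
           -p.2))
        (0, 1)).1 = Dcols a k l q.toNat (colsOf mask q.toNat) := by
    rw [hcols, pvSignFold]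
    rw [pvAltSum_congr _
      (fun c => eAt a (k + ((q.toNat - (colsOf mask q.toNat).length : Nat) : Int)) (l + (c : Int))
          * Dcols a k l q.toNat ((colsOf mask q.toNat).filter (fun x => decide (x ≠ c))))
      (colsOf mask q.toNat) ?_]
    · rw [← pvDcols_altSum a k l q.toNat (colsOf mask q.toNat) (pvColsOf_nodup _ _)
          (pvColsOf_ne_nil mask q.toNat hm0 hmlt)]
      ring
    · intro c hc
      obtain ⟨hclt, hcbit⟩ := (pvColsOf_mem mask q.toNat c).mp hc
      have hsub_lt : mask ^^^ ((1:Nat) <<< c) < mask := pvXor_lt mask c hcbit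
      rw [hval (mask ^^^ ((1:Nat) <<< c)) hsub_lt]
      rw [pvColsOf_xor mask q.toNat c hcbit]
      have hR : k + q - ((colsOf mask q.toNat).length : Int)
          = k + ((q.toNat - (colsOf mask q.toNat).length : Nat) : Int) := by omega
      rw [hR]
      rfl
  constructor
  · rw [List.length_set, hlen]
  · intro m hm
    by_cases hmm : m = mask
    · subst hmm
      rw [List.getD_eq_getElem?_getD, List.getElem?_set_self (by omega)]
      simp only [Option.getD_some]
      exact hacc
    · have hm' : m < mask := by omega
      rw [List.getD_eq_getElem?_getD, List.getElem?_set_ne (fun h => hmm h.symm)]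
      rw [← List.getD_eq_getElem?_getD]
      exact hval m hm'

-- the DP table of blockDet computes Dcols
theorem pvBlockDet_eq (a : List (List Int)) (k l q : Int) (hq0 : 0 ≤ q) :
    blockDet a k l q = Dcols a k l q.toNat (List.range q.toNat) := by
  have hqq : ((q.toNat : Int)) = q := Int.toNat_of_nonneg hq0
  have hpow : 0 < 2 ^ q.toNat := Nat.two_pow_pos _
  have main : ∀ (n : Nat), n ≤ 2 ^ q.toNat - 1 →
      ((List.range' 1 n).foldl
        (fun d mask =>
          d.set mask
            ((((List.range q.toNat).filter (fun c => (mask >>> c) &&& 1 == 1)).foldl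
              (fun (p : Int × Int) (c : Nat) =>
                (p.1 + p.2 * PySem.List.pyGetD (PySem.List.pyGetD a (k + q - ((((List.range q.toNat).filter (fun c => (mask >>> c) &&& 1 == 1)).length : Nat) : Int)) []) (l + (c : Int)) 0
                    * d.getD (mask ^^^ ((1:Nat) <<< c)) 0,
                 -p.2))
              (0, 1)).1))
        ((List.replicate (2 ^ q.toNat) (0 : Int)).set 0 1)).length = 2 ^ q.toNat ∧
      ∀ (m : Nat), m ≤ n →
        ((List.range' 1 n).foldl
          (fun d mask =>
            d.set mask
              ((((List.range q.toNat).filter (fun c => (mask >>> c) &&& 1 == 1)).foldl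
                (fun (p : Int × Int) (c : Nat) =>
                  (p.1 + p.2 * PySem.List.pyGetD (PySem.List.pyGetD a (k + q - ((((List.range q.toNat).filter (fun c => (mask >>> c) &&& 1 == 1)).length : Nat) : Int)) []) (l + (c : Int)) 0
                      * d.getD (mask ^^^ ((1:Nat) <<< c)) 0,
                   -p.2))
                (0, 1)).1))
          ((List.replicate (2 ^ q.toNat) (0 : Int)).set 0 1)).getD m 0
        = Dcols a k l q.toNat (colsOf m q.toNat) := by
    intro n
    induction n with
    | zero =>
      intro _
      constructor
      · simp
      · intro m hm
        interval_cases m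
        rw [show List.range' 1 0 = ([] : List Nat) from rfl, List.foldl_nil]
        rw [List.getD_eq_getElem?_getD, List.getElem?_set_self (by simpa using hpow)]
        simp [pvColsOf_zero, pvDcols_nil]
    | succ n ihn =>
      intro hn1
      obtain ⟨hlen, hval⟩ := ihn (by omega)
      rw [List.range'_1_concat, List.foldl_append, List.foldl_cons, List.foldl_nil]
      have hstep := pvDPstep a k l q _ (1 + n) hqq hlen
        (fun m' hm' => hval m' (by omega)) (by omega) (by omega)
      exact ⟨hstep.1, fun m hm => hstep.2 m (by omega)⟩
  have hB : blockDet a k l q =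
      ((List.range' 1 (2 ^ q.toNat - 1)).foldl
        (fun d mask =>
          d.set mask
            ((((List.range q.toNat).filter (fun c => (mask >>> c) &&& 1 == 1)).foldl
              (fun (p : Int × Int) (c : Nat) =>
                (p.1 + p.2 * PySem.List.pyGetD (PySem.List.pyGetD a (k + q - ((((List.range q.toNat).filter (fun c => (mask >>> c) &&& 1 == 1)).length : Nat) : Int)) []) (l + (c : Int)) 0
                    * d.getD (mask ^^^ ((1:Nat) <<< c)) 0,
                 -p.2))
              (0, 1)).1))
        ((List.replicate (2 ^ q.toNat) (0 : Int)).set 0 1)).getD (2 ^ q.toNat - 1) 0 := rfl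
  rw [hB, (main (2 ^ q.toNat - 1) le_rfl).2 (2 ^ q.toNat - 1) le_rfl, pvColsOf_full]

-- ===== A-side loop lemmas =====

theorem pvSetAt {α : Type} (l1 l2 : List α) (n : Nat) (v : α) (h : n = l1.length) :
    (l1 ++ l2).set n v = l1 ++ l2.set 0 v := by
  subst h; simp

theorem pvGetDAt {α : Type} (l1 l2 : List α) (n : Nat) (d : α) (h : n = l1.length) :
    (l1 ++ l2).getD n d = l2.getD 0 d := by
  subst h; simp [List.getD_eq_getElem?_getD, List.getElem?_append_right]

theorem pvWriteback {β : Type} (step : List Int → β → List Int) :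
    ∀ (ns : List β) (t : List (List Int)) (mi : Nat), mi < t.length →
      ns.foldl (fun t n => t.set mi (step (t.getD mi []) n)) t
        = t.set mi (ns.foldl step (t.getD mi [])) := by
  intro ns
  induction ns with
  | nil =>
    intro t mi h
    rw [List.foldl_nil, List.foldl_nil, List.getD_eq_getElem _ _ h, List.set_getElem_self]
  | cons n ns ih =>
    intro t mi h
    rw [List.foldl_cons, List.foldl_cons]
    rw [ih (t.set mi (step (t.getD mi []) n)) mi (by simpa using h)]
    have hg : (t.set mi (step (t.getD mi []) n)).getD mi [] = step (t.getD mi []) n := by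
      rw [List.getD_eq_getElem?_getD, List.getElem?_set_self (by simpa using h)]
      rfl
    rw [hg, List.set_set]

theorem pvRowAppendFold {β : Type} : ∀ (ls : List β) (row : List Int),
    ls.foldl (fun r _ => r ++ [(0 : Int)]) row = row ++ List.replicate ls.length 0 := by
  intro ls
  induction ls with
  | nil => intro row; simp
  | cons x xs ih =>
    intro row
    rw [List.foldl_cons, ih]
    simp [List.replicate_succ]

theorem pvSetFold (f : Nat → Int) : ∀ (c : Nat) (row : List Int), c ≤ row.length →
    (List.range c).foldl (fun row n => row.set n (f n)) row = (List.range c).map f ++ row.drop c := by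
  intro c
  induction c with
  | zero => intro row _; simp
  | succ c ih =>
    intro row hc
    rw [List.range_succ, List.foldl_append, List.foldl_cons, List.foldl_nil, ih row (by omega)]
    rw [pvSetAt _ _ _ _ (by simp)]
    rw [List.drop_eq_getElem_cons (by omega : c < row.length), List.set_cons_zero]
    simp

theorem pvShape_replicate (qn : Nat) : pvShape qn (List.replicate qn (List.replicate qn (0:Int))) := by
  constructor
  · simp
  · intro r hr
    rw [List.eq_of_mem_replicate hr]
    simp

theorem pvTdArray (qn : Nat) : td_array (qn : Int) (qn : Int) = List.replicate qn (List.replicate qn 0) := by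
  unfold td_array
  simp only [PySem.List.pyRange_zero_natCast, List.foldl_map, PySem.List.pySetD_natCast,
    PySem.List.pyGetD_natCast]
  suffices h : ∀ c : Nat,
      (List.range c).foldl
        (fun temp i => (List.range qn).foldl (fun temp _j => temp.set i (temp.getD i [] ++ [(0:Int)])) (temp ++ [[]])) []
        = List.replicate c (List.replicate qn 0) from h qn
  intro c
  induction c with
  | zero => rfl
  | succ c ih =>
    rw [List.range_succ, List.foldl_append, List.foldl_cons, List.foldl_nil, ih]
    rw [pvWriteback (fun row _ => row ++ [(0:Int)]) (List.range qn) _ c (by simp)]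
    rw [pvRowAppendFold]
    rw [pvGetDAt (List.replicate c (List.replicate qn 0)) [[]] c [] (by simp)]
    rw [List.getD_cons_zero, List.nil_append]
    rw [pvSetAt (List.replicate c (List.replicate qn 0)) [[]] c _ (by simp)]
    rw [List.set_cons_zero, List.length_range]
    rw [← List.replicate_succ']

theorem pvFillLoop (a : List (List Int)) (k l : Int) (qn : Nat) :
    ∀ (c : Nat) (t : List (List Int)), c ≤ qn → t.length = qn → (∀ r ∈ t, r.length = qn) →
      (List.range c).foldl
        (fun t m => (List.range qn).foldl
          (fun t n => t.set m ((t.getD m []).set n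
            (PySem.List.pyGetD (PySem.List.pyGetD a (k + (m : Int)) []) (l + (n : Int)) 0))) t) t
      = (List.range c).map
          (fun (m : Nat) => (List.range qn).map
            (fun (n : Nat) => PySem.List.pyGetD (PySem.List.pyGetD a (k + (m : Int)) []) (l + (n : Int)) 0))
        ++ t.drop c := by
  intro c
  induction c with
  | zero => intro t _ _ _; simp
  | succ c ih =>
    intro t hc hlen hrows
    rw [List.range_succ, List.foldl_append, List.foldl_cons, List.foldl_nil, ih t (by omega) hlen hrows]
    have hplen : ((List.range c).map
        (fun (m : Nat) => (List.range qn).map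
          (fun (n : Nat) => PySem.List.pyGetD (PySem.List.pyGetD a (k + (m : Int)) []) (l + (n : Int)) 0))).length = c := by
      simp
    have hTlen : (((List.range c).map
        (fun (m : Nat) => (List.range qn).map
          (fun (n : Nat) => PySem.List.pyGetD (PySem.List.pyGetD a (k + (m : Int)) []) (l + (n : Int)) 0)))
        ++ t.drop c).length = qn := by
      simp; omega
    rw [pvWriteback
      (fun row n => row.set n (PySem.List.pyGetD (PySem.List.pyGetD a (k + (c : Int)) []) (l + (n : Int)) 0))
      (List.range qn) _ c (by rw [hTlen]; omega)]
    rw [pvGetDAt _ _ _ _ hplen.symm]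
    rw [List.drop_eq_getElem_cons (by omega : c < t.length), List.getD_cons_zero]
    have hrlen : t[c].length = qn := hrows t[c] (List.getElem_mem (by omega))
    rw [pvSetFold _ qn t[c] (le_of_eq hrlen.symm)]
    rw [List.drop_eq_nil_of_le (le_of_eq hrlen), List.append_nil]
    rw [pvSetAt _ _ _ _ hplen.symm]
    rw [List.set_cons_zero]
    simp

theorem pvFill_total (a : List (List Int)) (k l q : Int) (qn : Nat) (hq : q = (qn : Int))
    (t : List (List Int)) (ht : pvShape qn t) :
    (PySem.List.pyRange 0 q 1).foldl
      (fun t m =>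
        (PySem.List.pyRange 0 q 1).foldl
          (fun t n =>
            PySem.List.pySetD t m
              (PySem.List.pySetD (PySem.List.pyGetD t m []) n
                (PySem.List.pyGetD (PySem.List.pyGetD a (k + m) []) (l + n) 0)))
          t)
      t = subM a k l qn (List.range qn) := by
  subst hq
  simp only [PySem.List.pyRange_zero_natCast, List.foldl_map, PySem.List.pySetD_natCast,
    PySem.List.pyGetD_natCast]
  rw [pvFillLoop a k l qn qn t le_rfl ht.1 ht.2]
  rw [List.drop_eq_nil_of_le (le_of_eq ht.1), List.append_nil]
  unfold subM eAt
  rw [List.length_range]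
  apply List.map_congr_left
  intro r _
  rw [show qn - qn + r = r from by omega]

theorem pvL_loop (a : List (List Int)) (k q : Int) (qn : Nat) (hq : q = (qn : Int)) :
    ∀ (ls : List Int) (st : Int × List (List Int)), pvShape qn st.2 →
      ((ls.foldl
        (fun st l =>
          let t :=
            (PySem.List.pyRange 0 q 1).foldl
              (fun t m =>
                (PySem.List.pyRange 0 q 1).foldl
                  (fun t n =>
                    PySem.List.pySetD t m
                      (PySem.List.pySetD (PySem.List.pyGetD t m []) n
                        (PySem.List.pyGetD (PySem.List.pyGetD a (k + m) []) (l + n) 0)))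
                  t)
              st.2
          (if getdet t ≠ 0 then q else st.1, t))
        st).1
        = (if ls.any (fun l => decide (getdet (subM a k l qn (List.range qn)) ≠ 0)) then q else st.1))
      ∧ pvShape qn ((ls.foldl
        (fun st l =>
          let t :=
            (PySem.List.pyRange 0 q 1).foldl
              (fun t m =>
                (PySem.List.pyRange 0 q 1).foldl
                  (fun t n =>
                    PySem.List.pySetD t m
                      (PySem.List.pySetD (PySem.List.pyGetD t m []) n
                        (PySem.List.pyGetD (PySem.List.pyGetD a (k + m) []) (l + n) 0)))
                  t)
              st.2
          (if getdet t ≠ 0 then q else st.1, t))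
        st).2) := by
  intro ls
  induction ls with
  | nil => intro st h; exact ⟨by simp, h⟩
  | cons x ls ih =>
    intro st h
    simp only [List.foldl_cons]
    have hfill := pvFill_total a k x q qn hq st.2 h
    rw [hfill]
    obtain ⟨h1, h2⟩ := ih (if getdet (subM a k x qn (List.range qn)) ≠ 0 then q else st.1,
      subM a k x qn (List.range qn)) (pvShape_subM a k x qn)
    refine ⟨?_, h2⟩
    rw [h1]
    simp only [List.any_cons]
    by_cases hx : getdet (subM a k x qn (List.range qn)) ≠ 0
    · simp [hx]
    · simp [hx]

theorem pvIfChain (P1 P2 : Bool) (q r : Int) :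
    (if P2 = true then q else if P1 = true then q else r) = (if (P1 || P2) = true then q else r) := by
  cases P1 <;> cases P2 <;> simp

theorem pvK_loop (a : List (List Int)) (j q : Int) (qn : Nat) (hq : q = (qn : Int)) :
    ∀ (ks : List Int) (st : Int × List (List Int)), pvShape qn st.2 →
      ((ks.foldl
        (fun st k =>
          (PySem.List.pyRange 0 (j - q + 1) 1).foldl
            (fun st l =>
              let t :=
                (PySem.List.pyRange 0 q 1).foldl
                  (fun t m =>
                    (PySem.List.pyRange 0 q 1).foldl
                      (fun t n =>
                        PySem.List.pySetD t m
                          (PySem.List.pySetD (PySem.List.pyGetD t m []) n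
                            (PySem.List.pyGetD (PySem.List.pyGetD a (k + m) []) (l + n) 0)))
                      t)
                  st.2
              (if getdet t ≠ 0 then q else st.1, t))
            st)
        st).1
        = (if ks.any (fun k => (PySem.List.pyRange 0 (j - q + 1) 1).any
              (fun l => decide (getdet (subM a k l qn (List.range qn)) ≠ 0))) then q else st.1))
      ∧ pvShape qn ((ks.foldl
        (fun st k =>
          (PySem.List.pyRange 0 (j - q + 1) 1).foldl
            (fun st l =>
              let t :=
                (PySem.List.pyRange 0 q 1).foldl
                  (fun t m =>
                    (PySem.List.pyRange 0 q 1).foldl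
                      (fun t n =>
                        PySem.List.pySetD t m
                          (PySem.List.pySetD (PySem.List.pyGetD t m []) n
                            (PySem.List.pyGetD (PySem.List.pyGetD a (k + m) []) (l + n) 0)))
                      t)
                  st.2
              (if getdet t ≠ 0 then q else st.1, t))
            st)
        st).2) := by
  intro ks
  induction ks with
  | nil => intro st h; exact ⟨by simp, h⟩
  | cons x ks ih =>
    intro st h
    simp only [List.foldl_cons]
    obtain ⟨hl1, hl2⟩ := pvL_loop a x q qn hq (PySem.List.pyRange 0 (j - q + 1) 1) st h
    obtain ⟨h1, h2⟩ := ih _ hl2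
    refine ⟨?_, h2⟩
    rw [h1, hl1]
    simp only [List.any_cons]
    exact pvIfChain _ _ q st.1

def pvPG (a : List (List Int)) (i j q : Int) : Bool :=
  (PySem.List.pyRange 0 (i - q + 1) 1).any (fun k =>
    (PySem.List.pyRange 0 (j - q + 1) 1).any (fun l =>
      decide (getdet (subM a k l q.toNat (List.range q.toNat)) ≠ 0)))

def pvPB (a : List (List Int)) (i j q : Int) : Bool :=
  (PySem.List.pyRange 0 (i - q + 1) 1).any (fun k =>
    (PySem.List.pyRange 0 (j - q + 1) 1).any (fun l => blockDet a k l q != 0))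

def pvDfind (P : Int → Bool) : List Int → Int
  | [] => 1
  | q :: rest => if P q = true then q else pvDfind P rest

theorem pvA_eval (a : List (List Int)) :
    matrank a = (PySem.List.pyRange 1 (min (PySem.List.len a) (PySem.List.len (PySem.List.pyGetD a 0 [])) + 1) 1).foldl
      (fun r q => if pvPG a (PySem.List.len a) (PySem.List.len (PySem.List.pyGetD a 0 [])) q = true then q else r) 1 := by
  unfold matrank
  simp only []
  refine pvFoldl_fst _ _ _ ?_ ((1 : Int), ([] : List (List Int)))
  intro st q hmem
  have h1q : (1 : Int) ≤ q := ((PySem.List.mem_pyRange_one).mp hmem).1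
  have hq : q = ((q.toNat : Nat) : Int) := by omega
  have htd : td_array q q = List.replicate q.toNat (List.replicate q.toNat 0) := by
    conv_lhs => rw [hq]
    exact pvTdArray q.toNat
  have hsh : pvShape q.toNat (td_array q q) := by rw [htd]; exact pvShape_replicate q.toNat
  exact (pvK_loop a (PySem.List.len (PySem.List.pyGetD a 0 [])) q q.toNat hq
    (PySem.List.pyRange 0 (PySem.List.len a - q + 1) 1) (st.1, td_array q q) hsh).1

theorem pvSearch_eq (a : List (List Int)) (i j : Int) :
    ∀ (lst : List Int), searchQ a i j lst = pvDfind (pvPB a i j) lst := by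
  intro lst
  induction lst with
  | nil => rfl
  | cons x rest ih =>
    simp only [searchQ, pvDfind, pvPB]
    rw [ih]
    rfl

theorem pvAscDesc (P : Int → Bool) : ∀ (n : Nat) (Q : Int), (Q - 1).toNat ≤ n →
    (PySem.List.pyRange 2 (Q + 1) 1).foldl (fun r q => if P q = true then q else r) 1
      = pvDfind P (PySem.List.pyRange Q 1 (-1)) := by
  intro n
  induction n with
  | zero =>
    intro Q hQ
    rw [PySem.List.pyRange_one_eq_nil (by omega), PySem.List.pyRange_neg_one_eq_nil (by omega)]
    rfl
  | succ n ih =>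
    intro Q hQ
    by_cases hQ1 : Q ≤ 1
    · rw [PySem.List.pyRange_one_eq_nil (by omega), PySem.List.pyRange_neg_one_eq_nil (by omega)]
      rfl
    · rw [PySem.List.pyRange_one_succ_right (by omega : (2:Int) ≤ Q)]
      rw [List.foldl_append, List.foldl_cons, List.foldl_nil]
      rw [PySem.List.pyRange_neg_one_cons (by omega : (1:Int) < Q)]
      simp only [pvDfind]
      by_cases hP : P Q = true
      · rw [if_pos hP, if_pos hP]
      · rw [if_neg hP, if_neg hP]
        have hres := ih (Q - 1) (by omega)
        rw [show Q - 1 + 1 = Q from by omega] at hres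
        exact hres

theorem pvPG_eq_PB (a : List (List Int)) (i j q : Int) (hq2 : (2:Int) ≤ q) :
    pvPG a i j q = pvPB a i j q := by
  unfold pvPG pvPB
  apply PySem.List.any_congr_mem
  intro k _
  apply PySem.List.any_congr_mem
  intro l _
  rw [pvBlockDet_eq a k l q (by omega)]
  rw [← pvGetdet_eq_Dcols a k l q.toNat q.toNat (List.range q.toNat) (by simp) (by omega) le_rfl]
  by_cases h : getdet (subM a k l q.toNat (List.range q.toNat)) = 0 <;> simp [h]

theorem pvMain (a : List (List Int)) : matrank a = matrank_alt a := by
  rw [pvA_eval a]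
  have hB : matrank_alt a
      = pvDfind (pvPB a (PySem.List.len a) (PySem.List.len (PySem.List.pyGetD a 0 [])))
          (PySem.List.pyRange (min (PySem.List.len a) (PySem.List.len (PySem.List.pyGetD a 0 []))) 1 (-1)) := by
    rw [show matrank_alt a = searchQ a (PySem.List.len a) (PySem.List.len (PySem.List.pyGetD a 0 []))
      (PySem.List.pyRange (min (PySem.List.len a) (PySem.List.len (PySem.List.pyGetD a 0 []))) 1 (-1)) from rfl]
    rw [pvSearch_eq]
  rw [hB]
  by_cases hQ : min (PySem.List.len a) (PySem.List.len (PySem.List.pyGetD a 0 [])) ≤ 0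
  · rw [PySem.List.pyRange_one_eq_nil (by omega), PySem.List.pyRange_neg_one_eq_nil (by omega)]
    rfl
  · rw [PySem.List.pyRange_one_cons (by omega :
      (1:Int) < min (PySem.List.len a) (PySem.List.len (PySem.List.pyGetD a 0 [])) + 1)]
    rw [List.foldl_cons]
    simp only [ite_self]
    rw [show (1:Int) + 1 = 2 from rfl]
    have hcong :
        (PySem.List.pyRange 2 (min (PySem.List.len a) (PySem.List.len (PySem.List.pyGetD a 0 [])) + 1) 1).foldl
          (fun r q => if pvPG a (PySem.List.len a) (PySem.List.len (PySem.List.pyGetD a 0 [])) q = true then q else r) 1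
        = (PySem.List.pyRange 2 (min (PySem.List.len a) (PySem.List.len (PySem.List.pyGetD a 0 [])) + 1) 1).foldl
          (fun r q => if pvPB a (PySem.List.len a) (PySem.List.len (PySem.List.pyGetD a 0 [])) q = true then q else r) 1 :=
      PySem.List.foldl_congr_mem _ _ _ _ (by
        intro acc x hx
        have h2 : (2:Int) ≤ x := ((PySem.List.mem_pyRange_one).mp hx).1
        rw [pvPG_eq_PB a _ _ x h2])
    rw [hcong]
    exact pvAscDesc _ ((min (PySem.List.len a) (PySem.List.len (PySem.List.pyGetD a 0 [])) - 1).toNat)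
      _ (by omega)

-- ===== VERDICT (by name: the statement is the Claim_ definition above) =====
theorem matrank_spec : Claim_equal_matrank := by
  intro a _hDom _hPre
  unfold Spec_matrank
  exact pvMain a
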